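-- pv_equiv track=rewrite | github.com/nus-safmc/esp-everything | laptop/exploration.py | extract_gaps
-- ===== SOURCE A (Python) =====
-- def extract_gaps(blocked: list[bool]) -> list[tuple[int, int]]:
--     """
--     Find contiguous runs of free (False) bins in the circular VFH array.
--
--     Returns a list of (center_bin, width) tuples.
--     center_bin is the middle bin index of the gap (mod VFH_BINS).
--     """
--     n = len(blocked)
--
--     # Find any blocked bin to start from (avoids splitting a gap)
--     start = None
--     for i in range(n):
--         if blocked[i]:
--             start = i
--             break
--
--     if start is None:
--         # Entire field clear — one gap spanning all bins
--         return [(0, n)]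
--
--     gaps = []
--     gap_start = None
--     gap_len = 0
--
--     for step in range(n):
--         b = (start + 1 + step) % n
--         if not blocked[b]:
--             if gap_start is None:
--                 gap_start = b
--             gap_len += 1
--         else:
--             if gap_start is not None:
--                 center = (gap_start + gap_len // 2) % n
--                 gaps.append((center, gap_len))
--                 gap_start = None
--                 gap_len = 0
--
--     # Close a gap that wraps past the starting point
--     if gap_start is not None:
--         center = (gap_start + gap_len // 2) % n
--         gaps.append((center, gap_len))
--
--     return gaps
-- ===== SOURCE B (Python) =====
-- def extract_gaps(blocked: list[bool]) -> list[tuple[int, int]]: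
--     n = len(blocked)
--     blocked_pos = [i for i in range(n) if blocked[i]]
--     if not blocked_pos:
--         return [(0, n)]
--     m = len(blocked_pos)
--     gaps = []
--     for j in range(m):
--         p = blocked_pos[j]
--         q = blocked_pos[(j + 1) % m]
--         gap_len = (q - p - 1) % n
--         if gap_len > 0:
--             gaps.append((((p + 1) % n + gap_len // 2) % n, gap_len))
--     return gaps
-- ===== Notes on version B (the rewrite author's own statement) =====
-- stated objective: alternative
-- what changed: A runs a stateful circular scan of all n bins from the first blocked bin, accumulating free runs in a gap_start/gap_len state machine; B instead collects the blocked positions once and emits one gap per consecutive (circular) pair of blocked positions by modular arithmetic, with no scan state.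
import Mathlib
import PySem

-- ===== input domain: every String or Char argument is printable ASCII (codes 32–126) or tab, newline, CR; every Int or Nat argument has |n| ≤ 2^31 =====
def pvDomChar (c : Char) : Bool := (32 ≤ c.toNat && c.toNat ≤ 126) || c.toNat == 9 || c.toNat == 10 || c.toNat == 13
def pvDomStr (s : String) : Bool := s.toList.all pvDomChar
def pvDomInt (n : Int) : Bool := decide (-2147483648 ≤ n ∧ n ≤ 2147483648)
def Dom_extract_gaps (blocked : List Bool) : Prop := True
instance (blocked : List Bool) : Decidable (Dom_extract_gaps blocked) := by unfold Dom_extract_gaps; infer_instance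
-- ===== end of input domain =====

-- B replaces A's circular state-machine scan of all n bins by arithmetic on the
-- (much shorter) list of blocked positions: one gap per consecutive pair, mod n.
-- Objective: alternative decomposition (O(n) either way; B avoids the stateful scan).

-- ===== PORT A =====
-- All Python list accesses blocked[i] in A use indices in [0, n); ported with pyGetD
-- (the default is never consulted).
def aFindStart (blocked : List Bool) : List Int → Option Int
  | [] => none
  | i :: rest =>
      if PySem.List.pyGetD blocked i false then some i else aFindStart blocked rest

def aStep (blocked : List Bool) (n start : Int)
    (st : List (Int × Int) × Option Int × Int) (step : Int) :
    List (Int × Int) × Option Int × Int :=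
  let b := PySem.Int.mod (start + 1 + step) n
  if !(PySem.List.pyGetD blocked b false) then
    (st.1, (match st.2.1 with | none => some b | some g => some g), st.2.2 + 1)
  else
    match st.2.1 with
    | some g =>
        (st.1 ++ [(PySem.Int.mod (g + PySem.Int.floordiv st.2.2 2) n, st.2.2)], none, 0)
    | none => st

def extract_gaps (blocked : List Bool) : List (Int × Int) :=
  let n : Int := blocked.length
  match aFindStart blocked (PySem.List.pyRange 0 n) with
  | none => [(0, n)]
  | some start =>
      let st := (PySem.List.pyRange 0 n).foldl (aStep blocked n start) ([], none, 0)
      match st.2.1 with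
      | some g => st.1 ++ [(PySem.Int.mod (g + PySem.Int.floordiv st.2.2 2) n, st.2.2)]
      | none => st.1

-- ===== PORT B =====
def extract_gaps_alt (blocked : List Bool) : List (Int × Int) :=
  let n : Int := blocked.length
  let pos := (PySem.List.pyRange 0 n).filter (fun i => PySem.List.pyGetD blocked i false)
  if pos.isEmpty then [(0, n)]
  else
    let m : Int := pos.length
    (PySem.List.pyRange 0 m).foldl (fun gaps j =>
      let p := PySem.List.pyGetD pos j 0
      let q := PySem.List.pyGetD pos (PySem.Int.mod (j + 1) m) 0
      let gapLen := PySem.Int.mod (q - p - 1) n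
      if gapLen > 0 then
        gaps ++ [(PySem.Int.mod (PySem.Int.mod (p + 1) n + PySem.Int.floordiv gapLen 2) n, gapLen)]
      else gaps) []

-- ===== PRECONDITION & SPEC =====
def Spec_extract_gaps (blocked : List Bool) (out : List (Int × Int)) : Prop := out = extract_gaps_alt blocked
instance (blocked : List Bool) (out : List (Int × Int)) : Decidable (Spec_extract_gaps blocked out) := by unfold Spec_extract_gaps; infer_instance

-- ===== CLAIM (what is proved, stated in full; the proofs are below) =====
def Claim_equal_extract_gaps : Prop := ∀ (blocked : List Bool), Dom_extract_gaps blocked → Spec_extract_gaps blocked (extract_gaps blocked)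


-- ===== LEMMAS AND PROOFS =====

-- ---- proof-side vocabulary ----

-- the gap entry both ports build from a stored gap start p+1 (mod n) and a length L
def egMod (n p L : Int) : List (Int × Int) :=
  if 0 < L then
    [(PySem.Int.mod (PySem.Int.mod (p + 1) n + PySem.Int.floordiv L 2) n, L)]
  else []

def emitA (n p q : Int) : List (Int × Int) := egMod n p (q - p - 1)

def emitB (n p q : Int) : List (Int × Int) := egMod n p (PySem.Int.mod (q - p - 1) n)

def nthI (ps : List Int) (k : Nat) : Int := ps.getD k 0

-- circular successive pairs of ps, the last one paired with e
def pairsC : List Int → Int → List (Int × Int)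
  | [], _ => []
  | [p], e => [(p, e)]
  | p :: q :: r, e => (p, q) :: pairsC (q :: r) e

-- k consecutive circular indices starting at c (mod n)
def JM (n c : Int) (k : Nat) : List Int :=
  (List.range k).map (fun (s : Nat) => PySem.Int.mod (c + (s : Int)) n)

-- A's inner-loop body, with the circular index b already computed
def bIdxStep (blocked : List Bool) (n : Int)
    (st : List (Int × Int) × Option Int × Int) (b : Int) :
    List (Int × Int) × Option Int × Int :=
  if !(PySem.List.pyGetD blocked b false) then
    (st.1, (match st.2.1 with | none => some b | some g => some g), st.2.2 + 1)
  else
    match st.2.1 with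
    | some g =>
        (st.1 ++ [(PySem.Int.mod (g + PySem.Int.floordiv st.2.2 2) n, st.2.2)], none, 0)
    | none => st

-- ---- small arithmetic helpers ----

theorem pvmod_eq_self {n a : Int} (hn : 0 < n) (h0 : 0 ≤ a) (h1 : a < n) :
    PySem.Int.mod a n = a := by
  rw [PySem.Int.mod_eq_emod_of_pos hn]; exact Int.emod_eq_of_lt h0 h1

theorem pvmod_add_n {n : Int} (hn : 0 < n) (a : Int) :
    PySem.Int.mod (a + n) n = PySem.Int.mod a n := by
  rw [PySem.Int.mod_eq_emod_of_pos hn, PySem.Int.mod_eq_emod_of_pos hn]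
  exact Int.add_emod_right a n

theorem pvmod_bounds {n : Int} (hn : 0 < n) (a : Int) :
    0 ≤ PySem.Int.mod a n ∧ PySem.Int.mod a n < n := by
  rw [PySem.Int.mod_eq_emod_of_pos hn]
  exact ⟨Int.emod_nonneg a (by omega), Int.emod_lt_of_pos a hn⟩

-- ---- aFindStart returns the head of the filtered list ----

theorem aFindStart_eq (blocked : List Bool) :
    ∀ l : List Int, aFindStart blocked l
      = (l.filter (fun i => PySem.List.pyGetD blocked i false)).head?
  | [] => rfl
  | i :: rest => by
      by_cases h : PySem.List.pyGetD blocked i false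
      · simp [aFindStart, h]
      · simp [aFindStart, h, aFindStart_eq blocked rest]

-- ---- JM: split lemmas ----

theorem JM_succ (n c : Int) (k : Nat) :
    JM n c (k + 1) = JM n c k ++ [PySem.Int.mod (c + k) n] := by
  simp [JM, List.range_succ]

theorem JM_add (n c : Int) (j k : Nat) :
    JM n c (j + k) = JM n c j ++ JM n (c + j) k := by
  induction k with
  | zero => simp [JM]
  | succ k ih =>
      have h1 : j + (k + 1) = (j + k) + 1 := by omega
      rw [h1, JM_succ, ih, JM_succ, List.append_assoc]
      congr 3
      push_cast
      ring

-- ---- the state machine over a run of free indices ----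

theorem fold_free (blocked : List Bool) (n c : Int) (g : List (Int × Int)) :
    ∀ k : Nat,
      (∀ s : Nat, s < k → PySem.List.pyGetD blocked (PySem.Int.mod (c + s) n) false = false) →
      (JM n c k).foldl (bIdxStep blocked n) (g, none, 0)
        = (g, if k = 0 then none else some (PySem.Int.mod c n), (k : Int)) := by
  intro k
  induction k with
  | zero => intro _; simp [JM]
  | succ k ih =>
      intro h
      rw [JM_succ, List.foldl_append, ih (fun s hs => h s (by omega))]
      have hfree := h k (by omega)
      by_cases hk : k = 0
      · subst hk
        have hfree' : PySem.List.pyGetD blocked (PySem.Int.mod c n) false = false := by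
          simpa using hfree
        simp [bIdxStep, hfree']
      · simp [bIdxStep, hfree, hk]

-- ---- one segment: a run of free indices closed by a blocked index ----

theorem fold_seg (blocked : List Bool) (n : Int) (g : List (Int × Int)) (p q : Int)
    (hpq : p < q)
    (hfree : ∀ s : Nat, (s : Int) < q - p - 1 →
        PySem.List.pyGetD blocked (PySem.Int.mod (p + 1 + s) n) false = false)
    (hblk : PySem.List.pyGetD blocked (PySem.Int.mod q n) false = true) :
    (JM n (p + 1) (q - p).toNat).foldl (bIdxStep blocked n) (g, none, 0)
      = (g ++ emitA n p q, none, 0) := by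
  have hL : (q - p).toNat = (q - p - 1).toNat + 1 := by omega
  have hcast : ((q - p - 1).toNat : Int) = q - p - 1 := by omega
  rw [hL, JM_succ, List.foldl_append,
      fold_free blocked n (p + 1) g (q - p - 1).toNat
        (fun s hs => hfree s (by omega))]
  have hq : p + 1 + ((q - p - 1).toNat : Int) = q := by omega
  rw [hq]
  by_cases h0 : (q - p - 1).toNat = 0
  · have : q - p - 1 = 0 := by omega
    simp [bIdxStep, hblk, emitA, egMod, this]
  · have hpos : 0 < q - p - 1 := by omega
    have hcast2 : (((q - p).toNat - 1 : Nat) : Int) = q - p - 1 := by omega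
    have hne : ¬((q - p).toNat - 1 = 0) := by omega
    have hlt : 1 < q - p := by omega
    simp [bIdxStep, hblk, emitA, egMod, hcast2, hne, hlt,
      PySem.Int.floordiv_eq_ediv_of_pos]

-- ---- folding over the concatenation of all segments ----

theorem fold_pairs (blocked : List Bool) (n : Int) :
    ∀ (ps : List Int) (e : Int) (g : List (Int × Int)),
      (∀ pq ∈ pairsC ps e, pq.1 < pq.2 ∧
          (∀ s : Nat, (s : Int) < pq.2 - pq.1 - 1 →
            PySem.List.pyGetD blocked (PySem.Int.mod (pq.1 + 1 + s) n) false = false) ∧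
          PySem.List.pyGetD blocked (PySem.Int.mod pq.2 n) false = true) →
      ((pairsC ps e).flatMap (fun pq => JM n (pq.1 + 1) (pq.2 - pq.1).toNat)).foldl
          (bIdxStep blocked n) (g, none, 0)
        = (g ++ (pairsC ps e).flatMap (fun pq => emitA n pq.1 pq.2), none, 0)
  | [], e, g, _ => by simp [pairsC]
  | [p], e, g, h => by
      have hp := h (p, e) (by simp [pairsC])
      simp only [pairsC, List.flatMap_cons, List.flatMap_nil, List.append_nil]
      exact fold_seg blocked n g p e hp.1 hp.2.1 hp.2.2
  | p :: q :: r, e, g, h => by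
      have hp := h (p, q) (by simp [pairsC])
      simp only [pairsC, List.flatMap_cons, List.foldl_append]
      rw [fold_seg blocked n g p q hp.1 hp.2.1 hp.2.2]
      rw [fold_pairs blocked n (q :: r) e (g ++ emitA n p q)
            (fun pq hpq => h pq (by simp [pairsC, hpq]))]
      simp

-- ---- segments telescope to one long circular run ----

theorem tele (n : Int) :
    ∀ (ps : List Int) (e : Int), ps ≠ [] → List.Pairwise (· < ·) ps →
      (∀ x ∈ ps, x ≤ e) →
      (pairsC ps e).flatMap (fun pq => JM n (pq.1 + 1) (pq.2 - pq.1).toNat)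
        = JM n (ps.headI + 1) ((e - ps.headI).toNat)
  | [], _, h, _, _ => absurd rfl h
  | [p], e, _, _, _ => by simp [pairsC]
  | p :: q :: r, e, _, hch, hle => by
      have hpq : p < q := (List.pairwise_cons.mp hch).1 q (by simp)
      have hqe : q ≤ e := hle q (by simp)
      have ih := tele n (q :: r) e (by simp) (List.pairwise_cons.mp hch).2
        (fun x hx => hle x (by simp [List.mem_cons] at hx ⊢; tauto))
      simp only [pairsC, List.flatMap_cons, ih]
      simp only [List.headI]
      have hsplit : (e - p).toNat = (q - p).toNat + (e - q).toNat := by omega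
      rw [hsplit, JM_add]
      congr 2
      omega

-- ---- every pair of pairsC is an adjacent pair of ps ++ [e] ----

theorem pairsC_decomp :
    ∀ (ps : List Int) (e : Int) (pq : Int × Int), pq ∈ pairsC ps e →
      ∃ l1 l2, ps ++ [e] = l1 ++ pq.1 :: pq.2 :: l2
  | [], _, _, h => by simp [pairsC] at h
  | [p], e, pq, h => by
      simp [pairsC] at h
      exact ⟨[], [], by simp [h]⟩
  | p :: q :: r, e, pq, h => by
      simp only [pairsC, List.mem_cons] at h
      rcases h with h | h
      · exact ⟨[], r ++ [e], by simp [h]⟩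
      · obtain ⟨l1, l2, hl⟩ := pairsC_decomp (q :: r) e pq h
        exact ⟨p :: l1, l2, by simp [hl]⟩

-- ---- B side: the index-based circular fold equals the pairsC flatMap ----

theorem idx_pairs (G : Int → Int → List (Int × Int)) :
    ∀ (ps : List Int) (w : Int), ps ≠ [] →
      ((List.range (ps.length - 1)).flatMap
          (fun k => G (nthI ps k) (nthI ps (k + 1))))
        ++ G (nthI ps (ps.length - 1)) w
      = (pairsC ps w).flatMap (fun pq => G pq.1 pq.2)
  | [], _, h => absurd rfl h
  | [p], w, _ => by simp [pairsC, nthI]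
  | p :: q :: r, w, _ => by
      have ih := idx_pairs G (q :: r) w (by simp)
      simp only [pairsC, List.flatMap_cons]
      rw [← ih]
      have hlen : (p :: q :: r).length - 1 = (r.length + 1) := by simp
      rw [hlen, List.range_succ_eq_map]
      simp only [List.flatMap_cons, List.flatMap_map]
      have h1 : nthI (p :: q :: r) 0 = p := rfl
      have h2 : nthI (p :: q :: r) 1 = q := rfl
      have h3 : ∀ k : Nat, nthI (p :: q :: r) (k + 1) = nthI (q :: r) k := fun k => rfl
      simp only [h1, h2, h3, Nat.succ_eq_add_one]
      have hlen2 : (q :: r).length - 1 = r.length := by simp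
      rw [hlen2]
      simp [List.append_assoc]

-- ---- B's emit on actual positions equals A's emit on unwrapped positions ----

theorem bridge (n : Int) (hn : 0 < n) (p0 : Int) (h00 : 0 ≤ p0) (h0n : p0 < n) :
    ∀ ps : List Int, List.Pairwise (· < ·) ps →
      (∀ x ∈ ps, 0 ≤ x ∧ x < n) → (∀ x ∈ ps, p0 ≤ x) →
      (pairsC ps p0).flatMap (fun pq => emitB n pq.1 pq.2)
        = (pairsC ps (p0 + n)).flatMap (fun pq => emitA n pq.1 pq.2)
  | [], _, _, _ => by simp [pairsC]
  | [p], _, hb, hm => by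
      have hbp := hb p (by simp)
      have hmp := hm p (by simp)
      simp only [pairsC, List.flatMap_cons, List.flatMap_nil, List.append_nil]
      unfold emitB emitA
      have h1 : PySem.Int.mod (p0 - p - 1) n = p0 - p - 1 + n := by
        rw [← pvmod_add_n hn, pvmod_eq_self hn (by omega) (by omega)]
      rw [h1]
      congr 1
      ring
  | p :: q :: r, hch, hb, hm => by
      have hbp := hb p (by simp)
      have hbq := hb q (by simp)
      have hpq : p < q := (List.pairwise_cons.mp hch).1 q (by simp)
      have ih := bridge n hn p0 h00 h0n (q :: r) (List.pairwise_cons.mp hch).2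
        (fun x hx => hb x (by simp [List.mem_cons] at hx ⊢; tauto))
        (fun x hx => hm x (by simp [List.mem_cons] at hx ⊢; tauto))
      simp only [pairsC, List.flatMap_cons, ih]
      congr 1
      unfold emitB emitA
      rw [pvmod_eq_self hn (by omega) (by omega)]



-- ---- per-pair facts for the concrete blocked-position list ----

theorem segOK (blocked : List Bool) (n : Int) (hn : 0 < n) (ps : List Int)
    (hmem : ∀ x, x ∈ ps ↔ (0 ≤ x ∧ x < n ∧ PySem.List.pyGetD blocked x false = true))
    (hpw : List.Pairwise (· < ·) ps)
    (P0 : Int) (hP0 : P0 ∈ ps) (hmin : ∀ x ∈ ps, P0 ≤ x) :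
    ∀ pq ∈ pairsC ps (P0 + n), pq.1 < pq.2 ∧
      (∀ s : Nat, (s : Int) < pq.2 - pq.1 - 1 →
        PySem.List.pyGetD blocked (PySem.Int.mod (pq.1 + 1 + s) n) false = false) ∧
      PySem.List.pyGetD blocked (PySem.Int.mod pq.2 n) false = true := by
  intro pq hpq
  have hP0b := (hmem P0).mp hP0
  obtain ⟨l1, l2, hl⟩ := pairsC_decomp ps (P0 + n) pq hpq
  have hle : ∀ x ∈ ps, x ≤ P0 + n := fun x hx => by
    have := (hmem x).mp hx; omega
  have hpwL : List.Pairwise (· < ·) (ps ++ [P0 + n]) := by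
    rw [List.pairwise_append]
    refine ⟨hpw, by simp, fun x hx y hy => ?_⟩
    simp only [List.mem_singleton] at hy
    subst hy
    have := (hmem x).mp hx
    omega
  have hpwD : List.Pairwise (· < ·) (l1 ++ pq.1 :: pq.2 :: l2) := hl ▸ hpwL
  obtain ⟨hpw1, hpw2, hcross⟩ := List.pairwise_append.mp hpwD
  have hadj : pq.1 < pq.2 := (List.pairwise_cons.mp hpw2).1 pq.2 (by simp)
  have hl2gt : ∀ x ∈ l2, pq.2 < x :=
    (List.pairwise_cons.mp (List.pairwise_cons.mp hpw2).2).1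
  have hl1lt : ∀ x ∈ l1, x < pq.1 := fun x hx => hcross x hx pq.1 (by simp)
  have hmemL : ∀ x, x ∈ ps ∨ x = P0 + n ↔ x ∈ l1 ∨ x = pq.1 ∨ x = pq.2 ∨ x ∈ l2 := by
    intro x
    constructor
    · intro h
      have : x ∈ l1 ++ pq.1 :: pq.2 :: l2 := by
        rw [← hl]; simp only [List.mem_append, List.mem_singleton]; tauto
      simp only [List.mem_append, List.mem_cons] at this; tauto
    · intro h
      have : x ∈ l1 ++ pq.1 :: pq.2 :: l2 := by
        simp only [List.mem_append, List.mem_cons]; tauto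
      rw [← hl] at this
      simp only [List.mem_append, List.mem_singleton] at this; tauto
  have hnobetween : ∀ x ∈ ps, ¬(pq.1 < x ∧ x < pq.2) := by
    intro x hx hcon
    rcases (hmemL x).mp (Or.inl hx) with h | h | h | h
    · exact absurd (hl1lt x h) (by omega)
    · omega
    · omega
    · exact absurd (hl2gt x h) (by omega)
  have hqin : pq.2 ∈ l1 ++ pq.1 :: pq.2 :: l2 := by simp
  have hqL : pq.2 ∈ ps ∨ pq.2 = P0 + n := by
    rw [← hl] at hqin
    simp only [List.mem_append, List.mem_singleton] at hqin; tauto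
  have hqle : pq.2 ≤ P0 + n := by
    rcases hqL with h | h
    · have := hle _ h; omega
    · omega
  have hpin : pq.1 ∈ ps := by
    have hpinD : pq.1 ∈ l1 ++ pq.1 :: pq.2 :: l2 := by simp
    rw [← hl] at hpinD
    simp only [List.mem_append, List.mem_singleton] at hpinD
    rcases hpinD with h | h
    · exact h
    · omega
  have hpb := (hmem pq.1).mp hpin
  have hminp : P0 ≤ pq.1 := hmin _ hpin
  refine ⟨hadj, fun s hs => ?_, ?_⟩
  · -- indices strictly inside the pair are free
    by_contra hcon
    have htrue : PySem.List.pyGetD blocked (PySem.Int.mod (pq.1 + 1 + s) n) false = true := by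
      revert hcon
      cases PySem.List.pyGetD blocked (PySem.Int.mod (pq.1 + 1 + s) n) false <;> simp
    have hvb := pvmod_bounds hn (pq.1 + 1 + s)
    have hvps : PySem.Int.mod (pq.1 + 1 + s) n ∈ ps :=
      (hmem _).mpr ⟨hvb.1, hvb.2, htrue⟩
    have hs0 : (0 : Int) ≤ s := Int.natCast_nonneg s
    by_cases hcase : pq.1 + 1 + s < n
    · have hv : PySem.Int.mod (pq.1 + 1 + s) n = pq.1 + 1 + s :=
        pvmod_eq_self hn (by omega) hcase
      exact hnobetween _ hvps (by omega)
    · have h2n : pq.1 + 1 + (s : Int) < 2 * n := by omega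
      have hv : PySem.Int.mod (pq.1 + 1 + s) n = pq.1 + 1 + s - n := by
        have heq : pq.1 + 1 + (s : Int) = (pq.1 + 1 + s - n) + n := by ring
        rw [heq, pvmod_add_n hn, pvmod_eq_self hn (by omega) (by omega)]
        ring
      have := hmin _ hvps
      omega
  · -- the closing index of the pair is blocked
    rcases hqL with h | h
    · have hqb := (hmem pq.2).mp h
      rw [pvmod_eq_self hn (by omega) (by omega)]
      exact hqb.2.2
    · rw [h, pvmod_add_n hn, pvmod_eq_self hn (by omega) (by omega)]
      exact hP0b.2.2

-- ---- A reduces to the pairsC form ----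

theorem A_main (blocked : List Bool) (ps : List Int)
    (hps : ps = (PySem.List.pyRange 0 (blocked.length : Int)).filter
        (fun i => PySem.List.pyGetD blocked i false))
    (P0 : Int) (t : List Int) (hps0 : ps = P0 :: t) :
    extract_gaps blocked
      = (pairsC ps (P0 + (blocked.length : Int))).flatMap
          (fun pq => emitA (blocked.length : Int) pq.1 pq.2) := by
  have hP0mem : P0 ∈ ps := by rw [hps0]; simp
  have hmem : ∀ x, x ∈ ps ↔ (0 ≤ x ∧ x < (blocked.length : Int) ∧
      PySem.List.pyGetD blocked x false = true) := by
    intro x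
    rw [hps, List.mem_filter, PySem.List.mem_pyRange_one]
    tauto
  have hn : (0 : Int) < blocked.length := by
    have := (hmem P0).mp hP0mem; omega
  have hpw : List.Pairwise (· < ·) ps := by
    rw [hps]; exact List.Pairwise.filter _ (PySem.List.pairwise_lt_pyRange_one 0 _)
  have hmin : ∀ x ∈ ps, P0 ≤ x := by
    intro x hx
    rw [hps0] at hx
    rcases List.mem_cons.mp hx with h | h
    · omega
    · have := (List.pairwise_cons.mp (hps0 ▸ hpw)).1 x h; omega
  have hfind : aFindStart blocked (PySem.List.pyRange 0 (blocked.length : Int)) = some P0 := by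
    rw [aFindStart_eq, ← hps, hps0]; rfl
  have e1 : (PySem.List.pyRange 0 (blocked.length : Int)).foldl
        (aStep blocked (blocked.length : Int) P0) ([], none, 0)
      = ((PySem.List.pyRange 0 (blocked.length : Int)).map
            (fun s => PySem.Int.mod (P0 + 1 + s) (blocked.length : Int))).foldl
          (bIdxStep blocked (blocked.length : Int)) ([], none, 0) := by
    rw [List.foldl_map]
    rfl
  have e2 : (PySem.List.pyRange 0 (blocked.length : Int)).map
        (fun s => PySem.Int.mod (P0 + 1 + s) (blocked.length : Int))
      = JM (blocked.length : Int) (P0 + 1) blocked.length := by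
    rw [PySem.List.pyRange_zero_nat blocked.length, List.map_map]
    simp only [JM]
    apply List.map_congr_left
    intro k _
    simp [Function.comp]
  have e3 : JM (blocked.length : Int) (P0 + 1) blocked.length
      = (pairsC ps (P0 + (blocked.length : Int))).flatMap
          (fun pq => JM (blocked.length : Int) (pq.1 + 1) (pq.2 - pq.1).toNat) := by
    rw [tele (blocked.length : Int) ps (P0 + (blocked.length : Int)) (by rw [hps0]; simp)
          hpw (fun x hx => by
            have := (hmem x).mp hx
            have h2 := (hmem P0).mp hP0mem
            omega)]
    rw [hps0]
    simp only [List.headI]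
    congr 1
    omega
  have hfold : (PySem.List.pyRange 0 (blocked.length : Int)).foldl
        (aStep blocked (blocked.length : Int) P0) ([], none, 0)
      = ([] ++ (pairsC ps (P0 + (blocked.length : Int))).flatMap
            (fun pq => emitA (blocked.length : Int) pq.1 pq.2), none, 0) := by
    rw [e1, e2, e3,
        fold_pairs blocked (blocked.length : Int) ps (P0 + (blocked.length : Int)) []
          (segOK blocked (blocked.length : Int) hn ps hmem hpw P0 hP0mem hmin)]
  simp only [extract_gaps, hfind, hfold, List.nil_append]

-- ---- B reduces to the pairsC form ----

theorem idx_to_pairs (n : Int) (ps : List Int) (P0 : Int) (t : List Int)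
    (hps0 : ps = P0 :: t) :
    (List.range ps.length).flatMap
        (fun (k : Nat) => emitB n (PySem.List.pyGetD ps (k : Int) 0)
          (PySem.List.pyGetD ps (PySem.Int.mod ((k : Int) + 1) (ps.length : Int)) 0))
      = (pairsC ps P0).flatMap (fun pq => emitB n pq.1 pq.2) := by
  have hK : 0 < ps.length := by rw [hps0]; simp
  have hm : (0 : Int) < (ps.length : Int) := by exact_mod_cast hK
  have h1 : List.range ps.length = List.range (ps.length - 1) ++ [ps.length - 1] := by
    conv_lhs => rw [show ps.length = (ps.length - 1) + 1 from by omega]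
    exact List.range_succ
  rw [h1, List.flatMap_append]
  have h2 : ∀ k ∈ List.range (ps.length - 1),
      emitB n (PySem.List.pyGetD ps (k : Int) 0)
          (PySem.List.pyGetD ps (PySem.Int.mod ((k : Int) + 1) (ps.length : Int)) 0)
        = emitB n (nthI ps k) (nthI ps (k + 1)) := by
    intro k hk
    have hk' : k < ps.length - 1 := List.mem_range.mp hk
    have hcast : ((k : Int) + 1) = ((k + 1 : Nat) : Int) := by push_cast; ring
    rw [hcast, pvmod_eq_self hm (by omega) (by omega)]
    rw [PySem.List.pyGetD_natCast, PySem.List.pyGetD_natCast]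
    rfl
  rw [List.flatMap_congr h2]
  have h3 : emitB n (PySem.List.pyGetD ps ((ps.length - 1 : Nat) : Int) 0)
        (PySem.List.pyGetD ps
          (PySem.Int.mod (((ps.length - 1 : Nat) : Int) + 1) (ps.length : Int)) 0)
      = emitB n (nthI ps (ps.length - 1)) (nthI ps 0) := by
    have hc : (((ps.length - 1 : Nat) : Int) + 1) = (ps.length : Int) := by omega
    rw [hc]
    have hmod : PySem.Int.mod (ps.length : Int) (ps.length : Int) = 0 := by
      rw [PySem.Int.mod_eq_emod_of_pos hm]; exact Int.emod_self
    rw [hmod, PySem.List.pyGetD_natCast, PySem.List.pyGetD_zero]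
    rfl
  simp only [List.flatMap_cons, List.flatMap_nil, List.append_nil, h3]
  have h4 := idx_pairs (fun p q => emitB n p q) ps (nthI ps 0) (by rw [hps0]; simp)
  have h5 : nthI ps 0 = P0 := by rw [hps0]; rfl
  rw [← h5]
  exact h4

theorem B_main (blocked : List Bool) (ps : List Int)
    (hps : ps = (PySem.List.pyRange 0 (blocked.length : Int)).filter
        (fun i => PySem.List.pyGetD blocked i false))
    (P0 : Int) (t : List Int) (hps0 : ps = P0 :: t) :
    extract_gaps_alt blocked
      = (pairsC ps P0).flatMap (fun pq => emitB (blocked.length : Int) pq.1 pq.2) := by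
  have hEmpty : ps.isEmpty = false := by rw [hps0]; rfl
  simp only [extract_gaps_alt, ← hps, hEmpty, Bool.false_eq_true, if_false]
  have hbody : ∀ (acc : List (Int × Int)), ∀ j ∈ PySem.List.pyRange 0 (ps.length : Int),
      (let p := PySem.List.pyGetD ps j 0
       let q := PySem.List.pyGetD ps (PySem.Int.mod (j + 1) (ps.length : Int)) 0
       let gapLen := PySem.Int.mod (q - p - 1) (blocked.length : Int)
       if gapLen > 0 then
         acc ++ [(PySem.Int.mod (PySem.Int.mod (p + 1) (blocked.length : Int) +
             PySem.Int.floordiv gapLen 2) (blocked.length : Int), gapLen)]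
       else acc)
      = acc ++ emitB (blocked.length : Int) (PySem.List.pyGetD ps j 0)
          (PySem.List.pyGetD ps (PySem.Int.mod (j + 1) (ps.length : Int)) 0) := by
    intro acc j _
    simp only [emitB, egMod]
    split_ifs with h
    · rfl
    · simp
  rw [PySem.List.foldl_congr_mem _ _ _ _ hbody, PySem.List.foldl_append_eq_flatMap,
      PySem.List.pyRange_zero_nat ps.length, List.flatMap_map]
  simp only [List.nil_append]
  exact idx_to_pairs (blocked.length : Int) ps P0 t hps0

theorem pv_main (blocked : List Bool) : extract_gaps blocked = extract_gaps_alt blocked := by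
  by_cases hps : (PySem.List.pyRange 0 (blocked.length : Int)).filter
      (fun i => PySem.List.pyGetD blocked i false) = []
  · simp only [extract_gaps, extract_gaps_alt, aFindStart_eq, hps, List.head?_nil,
      List.isEmpty_nil, if_true]
  · obtain ⟨P0, t, hps0⟩ : ∃ P0 t, (PySem.List.pyRange 0 (blocked.length : Int)).filter
        (fun i => PySem.List.pyGetD blocked i false) = P0 :: t := by
      cases h : (PySem.List.pyRange 0 (blocked.length : Int)).filter
          (fun i => PySem.List.pyGetD blocked i false) with
      | nil => exact absurd h hps
      | cons a l => exact ⟨a, l, rfl⟩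
    have hmem : ∀ x, x ∈ (PySem.List.pyRange 0 (blocked.length : Int)).filter
        (fun i => PySem.List.pyGetD blocked i false) ↔
        (0 ≤ x ∧ x < (blocked.length : Int) ∧ PySem.List.pyGetD blocked x false = true) := by
      intro x
      rw [List.mem_filter, PySem.List.mem_pyRange_one]
      tauto
    have hP0 := (hmem P0).mp (by rw [hps0]; simp)
    have hn : (0 : Int) < blocked.length := by omega
    have hpw : List.Pairwise (· < ·) ((PySem.List.pyRange 0 (blocked.length : Int)).filter
        (fun i => PySem.List.pyGetD blocked i false)) :=
      List.Pairwise.filter _ (PySem.List.pairwise_lt_pyRange_one 0 _)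
    have hmin : ∀ x ∈ (PySem.List.pyRange 0 (blocked.length : Int)).filter
        (fun i => PySem.List.pyGetD blocked i false), P0 ≤ x := by
      intro x hx
      rw [hps0] at hx
      rcases List.mem_cons.mp hx with h | h
      · omega
      · have := (List.pairwise_cons.mp (hps0 ▸ hpw)).1 x h; omega
    rw [A_main blocked _ rfl P0 t hps0, B_main blocked _ rfl P0 t hps0,
        bridge (blocked.length : Int) hn P0 (by omega) (by omega) _ hpw
          (fun x hx => by have := (hmem x).mp hx; omega) hmin]

-- ===== VERDICT (by name: the statement is the Claim_ definition above) =====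
theorem extract_gaps_spec : Claim_equal_extract_gaps := by
  intro blocked _
  unfold Spec_extract_gaps
  exact pv_main blocked
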